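-- pv_equiv track=rewrite | github.com/synthaicode/XRefKit | fm/skillrun.py | _overall_concern_status
-- ===== SOURCE A (Python) =====
-- def _overall_concern_status(concerns: list[dict[str, str]]) -> str:
--     if not concerns:
--         return "pending"
--     if all(concern["status"] in {"resolved", "escalated"} for concern in concerns):
--         if any(concern["status"] == "escalated" for concern in concerns):
--             return "escalated"
--         return "done"
--     return "blocked"
-- ===== SOURCE B (Python) =====
-- def _overall_concern_status(concerns: list[dict[str, str]]) -> str:
--     if not concerns:
--         return "pending"
--     escalated = False
--     for concern in concerns:
--         status = concern["status"]
--         if status == "escalated":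
--             escalated = True
--         elif status != "resolved":
--             return "blocked"
--     return "escalated" if escalated else "done"
-- ===== Notes on version B (the rewrite author's own statement) =====
-- stated objective: alternative
-- what changed: B replaces A's two separate short-circuiting all/any generator scans with one fused early-exit loop that carries an 'escalated seen' flag, looking each status up exactly once.
import Mathlib
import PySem

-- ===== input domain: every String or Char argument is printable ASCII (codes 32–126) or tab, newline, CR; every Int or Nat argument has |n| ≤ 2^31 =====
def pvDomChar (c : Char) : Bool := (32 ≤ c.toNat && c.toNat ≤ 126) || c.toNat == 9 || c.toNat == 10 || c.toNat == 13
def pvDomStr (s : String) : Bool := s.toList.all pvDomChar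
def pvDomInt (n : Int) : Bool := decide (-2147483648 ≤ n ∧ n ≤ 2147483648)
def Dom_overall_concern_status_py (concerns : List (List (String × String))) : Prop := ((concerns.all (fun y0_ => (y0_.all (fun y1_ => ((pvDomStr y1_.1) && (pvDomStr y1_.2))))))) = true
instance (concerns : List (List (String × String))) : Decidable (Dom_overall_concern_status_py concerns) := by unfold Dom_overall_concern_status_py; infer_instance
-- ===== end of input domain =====

-- B fuses A's two short-circuiting all/any scans into one early-exit pass carrying an
-- 'escalated seen' flag; same O(n) cost, one traversal and one lookup per concern.


-- ===== PORT A =====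
-- concern["status"]: Python raises KeyError when the key is missing; Pre_ excludes exactly the
-- inputs where that lookup is reached on a keyless dict, so the total form with default "" is
-- exact on every admitted input ("" is not a valid status, so it acts like any other bad status).
def pvStatus (c : List (String × String)) : String := (PySem.Dict.get? (PySem.Dict.mk c) "status").getD ""

def overall_concern_status_py (concerns : List (List (String × String))) : String :=
  if concerns = [] then "pending"
  else if concerns.all (fun c => pvStatus c == "resolved" || pvStatus c == "escalated") then
    if concerns.any (fun c => pvStatus c == "escalated") then "escalated" else "done"
  else "blocked"

-- ===== PORT B =====
-- the `for concern in concerns` loop of Source B with its `escalated` flag and early `return "blocked"`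
def pvAltLoop (l : List (List (String × String))) (escalated : Bool) : String :=
  match l with
  | [] => if escalated then "escalated" else "done"
  | c :: rest =>
    let status := pvStatus c
    if status == "escalated" then pvAltLoop rest true
    else if status != "resolved" then "blocked"
    else pvAltLoop rest escalated

def overall_concern_status_py_alt (concerns : List (List (String × String))) : String :=
  if concerns = [] then "pending" else pvAltLoop concerns false

-- ===== PRECONDITION & SPEC =====
-- Pre_ excludes exactly the inputs on which Python raises KeyError (A and B alike, at the same
-- concern): the first concern whose status is missing-or-bad must actually carry a "status" key.
def Pre_overall_concern_status_py (concerns : List (List (String × String))) : Prop :=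
  ((concerns.dropWhile (fun c => pvStatus c == "resolved" || pvStatus c == "escalated")).head?.all
    (fun c => PySem.Dict.contains (PySem.Dict.mk c) "status")) = true
instance (concerns : List (List (String × String))) : Decidable (Pre_overall_concern_status_py concerns) := by unfold Pre_overall_concern_status_py; infer_instance

def pvWitness_overall_concern_status_py : (List (List (String × String))) :=
  [[("status", "resolved")], [("status", "escalated")]]

def Spec_overall_concern_status_py (concerns : List (List (String × String))) (out : String) : Prop := out = overall_concern_status_py_alt concerns
instance (concerns : List (List (String × String))) (out : String) : Decidable (Spec_overall_concern_status_py concerns out) := by unfold Spec_overall_concern_status_py; infer_instance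

-- ===== CLAIM (what is proved, stated in full; the proofs are below) =====
def Claim_equal_overall_concern_status_py : Prop := ∀ (concerns : List (List (String × String))), Dom_overall_concern_status_py concerns → Pre_overall_concern_status_py concerns → Spec_overall_concern_status_py concerns (overall_concern_status_py concerns)

-- ===== LEMMAS AND PROOFS =====

-- B's fused loop computes exactly A's all/any combination (the flag accumulates the `any`).
lemma pvAltLoop_eq (l : List (List (String × String))) (esc : Bool) :
    pvAltLoop l esc =
      if l.all (fun c => pvStatus c == "resolved" || pvStatus c == "escalated") then
        if l.any (fun c => pvStatus c == "escalated") || esc then "escalated" else "done"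
      else "blocked" := by
  induction l generalizing esc with
  | nil => simp [pvAltLoop]
  | cons c rest ih =>
    simp only [pvAltLoop, List.all_cons, List.any_cons]
    by_cases he : pvStatus c = "escalated"
    · simp [he, ih]
    · by_cases hr : pvStatus c = "resolved"
      · simp [hr, ih]
      · simp [he, hr]

-- ===== VERDICT (by name: the statement is the Claim_ definition above) =====
theorem overall_concern_status_py_spec : Claim_equal_overall_concern_status_py := by
  intro concerns _ _
  unfold Spec_overall_concern_status_py overall_concern_status_py overall_concern_status_py_alt
  rw [pvAltLoop_eq]
  simp
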